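-- pv_equiv track=rewrite | github.com/Zeydel/Everybody-Codes | The Entertainment Hub/Quest2/Quest2_part3.py | get_arrows_to_pop_balloons
-- ===== SOURCE A (Python) =====
-- def get_arrows_to_pop_balloons(balloons):
--
--     # Init shot order
--     shots = ['R', 'G', 'B']
--
--     # Shot index
--     shot_idx = 0
--
--     # While there is more than one balloon
--     while len(balloons) > 1:
--
--         # Compute middle
--         mid = len(balloons) // 2
--
--         # Determine if there is an even number of balloons
--         even = len(balloons) % 2 == 0
--
--         # Split into top and bottom ballons
--         top_balloons = balloons[:mid]
--         bottom_balloons = balloons[mid:]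
--
--         # Init bottoms remaining for next iterations
--         new_bottom = ""
--
--         # Set some vars depending on if there is even or odd balloons
--         if even:
--             bottom_idx = 0
--         else:
--             bottom_idx = 1
--             new_bottom = bottom_balloons[0]
--
--         # Go through top balloons
--         for balloon in top_balloons:
--
--             # Determine the shot to take
--             shot = shots[shot_idx % 3]
--
--             # If the number of ballons is even, and the shot doesn't match
--             # the color of the balloon, save the opposite balloon for next
--             # iteration and increment bottom index. There is now
--             # an odd number of balloons
--             if even and balloon != shot:
--                 new_bottom += bottom_balloons[bottom_idx]
--                 bottom_idx += 1
--                 even = False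
--             # If the number of balloons is even and the shot matches the ballon
--             # increment the bottom index, to signal that the opposite ballon has
--             # been popped
--             elif even:
--                 bottom_idx += 1
--             # If the number of ballons is odd, we only pop the topmost ballon
--             # there is now an even number of ballons
--             else:
--                 even = True
--
--             # Increment shot index
--             shot_idx += 1
--
--         # Compute remaining balloons
--         balloons = new_bottom + bottom_balloons[bottom_idx:]
--
--     # Return the number of shots taken, plus 0 or 1 depending on if there
--     # are any balloons left
--     return shot_idx + len(balloons)
-- ===== SOURCE B (Python) =====
-- def get_arrows_to_pop_balloons(balloons):
--     # Per-arrow simulation: one shot per loop iteration instead of A's half-batch folding.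
--     shots = ['R', 'G', 'B']
--     b = list(balloons)
--     idx = 0
--     while len(b) > 1:
--         if len(b) % 2 == 0 and b[0] == shots[idx % 3]:
--             del b[len(b) // 2]
--         del b[0]
--         idx += 1
--     return idx + len(b)
-- ===== Notes on version B (the rewrite author's own statement) =====
-- stated objective: simpler
-- what changed: Replaces A's half-batch folding (splitting into top/bottom halves and folding a whole top half per outer iteration with a new_bottom/bottom_idx/even state machine) by a plain per-arrow simulation: one loop iteration per shot that deletes the front balloon and, on an even count with matching color, the diametrically opposite balloon.
import Mathlib
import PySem

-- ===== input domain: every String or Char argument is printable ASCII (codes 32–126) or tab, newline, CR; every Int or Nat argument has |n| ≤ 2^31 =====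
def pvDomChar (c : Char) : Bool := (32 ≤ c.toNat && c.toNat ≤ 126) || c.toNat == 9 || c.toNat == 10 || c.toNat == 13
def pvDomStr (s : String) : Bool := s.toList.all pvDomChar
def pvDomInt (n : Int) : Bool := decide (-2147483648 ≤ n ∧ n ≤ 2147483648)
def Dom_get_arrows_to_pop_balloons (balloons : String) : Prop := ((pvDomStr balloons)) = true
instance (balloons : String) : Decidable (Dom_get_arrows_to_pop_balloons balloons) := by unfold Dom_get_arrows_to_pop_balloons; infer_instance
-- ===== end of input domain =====

-- B replaces A's half-batch folding (a whole top half per outer iteration, driven by a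
-- new_bottom/bottom_idx/even state machine) by a simpler per-arrow simulation: one loop
-- iteration per shot, deleting the front balloon and, on an even count with a matching
-- color, the diametrically opposite one.  Objective: simpler; same exact results.

-- ===== PORT A =====
def pvShots : List Char := ['R', 'G', 'B']

-- state of A's inner for-loop: (new_bottom, bottom_idx, even, shot_idx)
structure PvASt where
  nb : List Char
  bi : Nat
  ev : Bool
  si : Nat
deriving Repr, DecidableEq

-- one iteration of A's `for balloon in top_balloons` body (bottom_balloons is fixed).
-- `bottom.getD st.bi 'R'` transcribes `bottom_balloons[bottom_idx]`; on every state A's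
-- loop actually reaches, st.bi < bottom.length (proved below), so the default never
-- fires where Python would raise (and Python never raises here).
def pvAStep (bottom : List Char) (st : PvASt) (c : Char) : PvASt :=
  if st.ev && (c != pvShots.getD (st.si % 3) 'R') then
    { nb := st.nb ++ [bottom.getD st.bi 'R'], bi := st.bi + 1, ev := false, si := st.si + 1 }
  else if st.ev then
    { nb := st.nb, bi := st.bi + 1, ev := true, si := st.si + 1 }
  else
    { nb := st.nb, bi := st.bi, ev := true, si := st.si + 1 }

-- the initial inner-loop state of a batch (A's even/odd initialisation)
def pvInitSt (b : List Char) (si : Nat) : PvASt :=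
  if b.length % 2 == 0 then ⟨[], 0, true, si⟩
  else ⟨[(b.drop (b.length / 2)).getD 0 'R'], 1, false, si⟩

-- invariant of A's inner loop (tlen = number of top balloons still to process);
-- stated before the ports because pvALoop's termination proof cites it via pvABatch_len.
def pvInv (bottom : List Char) (tlen : Nat) (st : PvASt) : Prop :=
  st.nb.length ≤ st.bi ∧ st.bi ≤ bottom.length ∧
  (if st.ev then tlen + st.nb.length + st.bi = bottom.length
   else tlen + st.nb.length + st.bi = bottom.length + 1 ∧ 1 ≤ st.nb.length)

theorem pvInv_foldl (t : List Char) (bottom : List Char) (st : PvASt)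
    (h : pvInv bottom t.length st) : pvInv bottom 0 (t.foldl (pvAStep bottom) st) := by
  induction t generalizing st with
  | nil => simpa using h
  | cons c t ih =>
    simp only [List.foldl_cons]
    apply ih
    obtain ⟨h1, h2, h3⟩ := h
    unfold pvAStep
    rcases hev : st.ev with _ | _
    · simp only [hev] at h3
      simp only [Bool.false_and]
      refine ⟨?_, ?_, ?_⟩ <;> simp [pvInv] at * <;> omega
    · simp only [hev] at h3
      by_cases hc : (c != pvShots.getD (st.si % 3) 'R') = true
      · simp only [hc, Bool.true_and]
        refine ⟨?_, ?_, ?_⟩ <;> simp at * <;> omega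
      · simp only [hc, Bool.true_and]
        refine ⟨?_, ?_, ?_⟩ <;> simp at * <;> omega

theorem pvInit_inv (b : List Char) (si : Nat) (h : 1 < b.length) :
    pvInv (b.drop (b.length / 2)) (b.take (b.length / 2)).length (pvInitSt b si) := by
  have ht : (b.take (b.length / 2)).length = b.length / 2 := by
    simp [List.length_take]; omega
  have hb : (b.drop (b.length / 2)).length = b.length - b.length / 2 := by
    simp [List.length_drop]
  unfold pvInitSt
  rcases Nat.mod_two_eq_zero_or_one b.length with he | he
  · rw [if_pos (by simpa using he)]
    exact ⟨by simp, by simp, by simp [ht, hb]; omega⟩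
  · rw [if_neg (by simp [he])]
    exact ⟨by simp, by simp [hb]; omega, by simp [ht, hb]; omega⟩

-- one iteration of A's outer while-loop: returns (remaining balloons, shot_idx)
def pvABatch (b : List Char) (si : Nat) : List Char × Nat :=
  let mid := b.length / 2
  let top := b.take mid
  let bottom := b.drop mid
  let st := top.foldl (pvAStep bottom) (pvInitSt b si)
  (st.nb ++ bottom.drop st.bi, st.si)

-- cited by pvALoop's decreasing_by
theorem pvABatch_len (b : List Char) (si : Nat) (h : 1 < b.length) :
    (pvABatch b si).1.length < b.length := by
  obtain ⟨i1, i2, i3⟩ :=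
    pvInv_foldl (b.take (b.length / 2)) (b.drop (b.length / 2)) (pvInitSt b si)
      (pvInit_inv b si h)
  have hd : (b.drop (b.length / 2)).length = b.length - b.length / 2 := by
    simp [List.length_drop]
  unfold pvABatch
  simp only [List.length_append, List.length_drop]
  split at i3 <;> omega

-- A's outer while-loop: b is the remaining balloons (as chars), si = shot_idx
def pvALoop (b : List Char) (si : Nat) : Nat :=
  if _h : 1 < b.length then
    pvALoop (pvABatch b si).1 (pvABatch b si).2
  else si + b.length
termination_by b.length
decreasing_by exact pvABatch_len b si _h

def get_arrows_to_pop_balloons (balloons : String) : Int :=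
  (pvALoop balloons.toList 0 : Int)

-- ===== PORT B =====
-- B's while-loop: one arrow per iteration; `del b[len(b)//2]` (only on an even count with
-- a color match) then `del b[0]`.  List.eraseIdx is exact for `del` here: len//2 < len.
def pvBLoop (b : List Char) (idx : Nat) : Nat :=
  if h : 1 < b.length then
    pvBLoop ((if (b.length % 2 == 0) && (b.getD 0 'R' == pvShots.getD (idx % 3) 'R') then
                b.eraseIdx (b.length / 2)
              else b).drop 1) (idx + 1)
  else idx + b.length
termination_by b.length
decreasing_by
  simp only [List.length_drop]
  split
  · rw [List.length_eraseIdx]; split <;> omega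
  · omega

def get_arrows_to_pop_balloons_alt (balloons : String) : Int :=
  (pvBLoop balloons.toList 0 : Int)

-- ===== PRECONDITION & SPEC =====
def Spec_get_arrows_to_pop_balloons (balloons : String) (out : Int) : Prop := out = get_arrows_to_pop_balloons_alt balloons
instance (balloons : String) (out : Int) : Decidable (Spec_get_arrows_to_pop_balloons balloons out) := by unfold Spec_get_arrows_to_pop_balloons; infer_instance

-- ===== CLAIM (what is proved, stated in full; the proofs are below) =====
def Claim_equal_get_arrows_to_pop_balloons : Prop := ∀ (balloons : String), Dom_get_arrows_to_pop_balloons balloons → Spec_get_arrows_to_pop_balloons balloons (get_arrows_to_pop_balloons balloons)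

-- ===== LEMMAS AND PROOFS =====

-- core simulation: one pass of A's inner loop over t equals t.length steps of B's loop,
-- where B's list is  t ++ new_bottom ++ bottom[bottom_idx:]
theorem pvSim (t : List Char) (bottom : List Char) (st : PvASt)
    (h : pvInv bottom t.length st) :
    pvBLoop (t ++ st.nb ++ bottom.drop st.bi) st.si =
      pvBLoop ((t.foldl (pvAStep bottom) st).nb ++
               bottom.drop (t.foldl (pvAStep bottom) st).bi)
              (t.foldl (pvAStep bottom) st).si := by
  induction t generalizing st with
  | nil => simp
  | cons c t ih =>
    obtain ⟨h1, h2, h3⟩ := h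
    simp only [List.foldl_cons]
    set L : List Char := c :: (t ++ st.nb ++ bottom.drop st.bi) with hL
    have hlen : L.length = 1 + t.length + st.nb.length + (bottom.length - st.bi) := by
      simp [hL]; omega
    rcases hev : st.ev with _ | _
    · -- odd count: A pops only the top balloon; B sees an odd length and deletes b[0]
      simp only [hev] at h3
      obtain ⟨h3, h4⟩ := h3
      have hgt : 1 < L.length := by simp at h3 ⊢; omega
      have hodd : L.length % 2 = 1 := by simp at h3 ⊢; omega
      rw [show (c :: t ++ st.nb ++ bottom.drop st.bi : List Char) = L from rfl,
          pvBLoop, dif_pos hgt]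
      rw [if_neg (by simp [hodd])]
      have hstep : pvAStep bottom st c =
          { nb := st.nb, bi := st.bi, ev := true, si := st.si + 1 } := by
        unfold pvAStep; simp [hev]
      rw [hstep]
      have := ih { nb := st.nb, bi := st.bi, ev := true, si := st.si + 1 }
        ⟨h1, h2, by simp at h3 ⊢; omega⟩
      simpa [hL] using this
    · -- even count
      simp only [hev] at h3
      have hbt : st.bi < bottom.length := by simp at h3 ⊢; omega
      have hgt : 1 < L.length := by omega
      have heven : L.length % 2 = 0 := by simp at h3 ⊢; omega
      have hhalf : L.length / 2 = 1 + t.length + st.nb.length := by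
        simp at h3 ⊢; omega
      have hget0 : L.getD 0 'R' = c := rfl
      rw [show (c :: t ++ st.nb ++ bottom.drop st.bi : List Char) = L from rfl,
          pvBLoop, dif_pos hgt]
      by_cases hc : c = pvShots.getD (st.si % 3) 'R'
      · -- color matches: B deletes the opposite balloon (index len/2) and the front
        have hcond : ((L.length % 2 == 0) && (L.getD 0 'R' == pvShots.getD (st.si % 3) 'R')) = true := by
          rw [heven, hget0, hc]; simp
        rw [if_pos hcond]
        have herase : L.eraseIdx (L.length / 2) =
            c :: (t ++ st.nb ++ bottom.drop (st.bi + 1)) := by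
          rw [hhalf, hL]
          have hsplit : (c :: (t ++ st.nb ++ bottom.drop st.bi)) =
              (c :: (t ++ st.nb)) ++ bottom.drop st.bi := by simp
          rw [hsplit, List.eraseIdx_append, if_neg (by simp)]
          have hix : 1 + t.length + st.nb.length - (c :: (t ++ st.nb)).length = 0 := by
            simp; omega
          rw [hix, List.drop_eq_getElem_cons hbt, List.eraseIdx_cons_zero]
          simp
        rw [herase]
        have hstep : pvAStep bottom st c =
            { nb := st.nb, bi := st.bi + 1, ev := true, si := st.si + 1 } := by
          unfold pvAStep; simp [hev, hc]
        rw [hstep]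
        have := ih { nb := st.nb, bi := st.bi + 1, ev := true, si := st.si + 1 }
          ⟨by simp; omega, by simp; omega, by simp at h3 ⊢; omega⟩
        simpa using this
      · -- mismatch: B deletes only the front; A saves the opposite balloon in new_bottom
        have hcond : ((L.length % 2 == 0) && (L.getD 0 'R' == pvShots.getD (st.si % 3) 'R')) = false := by
          rw [heven, hget0]
          simp only [beq_self_eq_true, Bool.true_and]
          exact beq_eq_false_iff_ne.mpr hc
        rw [if_neg (by rw [hcond]; exact Bool.false_ne_true)]
        have hstep : pvAStep bottom st c =
            { nb := st.nb ++ [bottom.getD st.bi 'R'], bi := st.bi + 1, ev := false,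
              si := st.si + 1 } := by
          have hc' : ¬c = pvShots[st.si % 3]?.getD 'R' := by
            simpa [List.getD_eq_getElem?_getD] using hc
          unfold pvAStep; simp [hev, hc']
        rw [hstep]
        have hdrop : bottom.drop st.bi = bottom.getD st.bi 'R' :: bottom.drop (st.bi + 1) := by
          rw [List.drop_eq_getElem_cons hbt, List.getD_eq_getElem _ _ hbt]
        have hre : t ++ st.nb ++ bottom.drop st.bi =
            t ++ (st.nb ++ [bottom.getD st.bi 'R']) ++ bottom.drop (st.bi + 1) := by
          rw [hdrop]; simp
        have := ih { nb := st.nb ++ [bottom.getD st.bi 'R'], bi := st.bi + 1, ev := false,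
                     si := st.si + 1 }
          ⟨by simp; omega, by simp; omega, by simp at h3 ⊢; omega⟩
        simp only [hL, List.drop_one, List.tail_cons]
        rw [hre]
        simpa using this

-- a nonempty list is its head (getD 0) consed on its drop 1
theorem pvGetD_cons_drop (l : List Char) (h : l ≠ []) :
    l.getD 0 'R' :: l.drop 1 = l := by
  cases l with
  | nil => exact absurd rfl h
  | cons a l => simp

-- the initial B list of a batch is the whole remaining balloon string
theorem pvInit_recon (b : List Char) (si : Nat) (h : 1 < b.length) :
    b.take (b.length / 2) ++ (pvInitSt b si).nb ++
      (b.drop (b.length / 2)).drop (pvInitSt b si).bi = b := by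
  have hbne : b.drop (b.length / 2) ≠ [] := by
    intro hn
    have := congrArg List.length hn
    simp only [List.length_drop, List.length_nil] at this
    omega
  unfold pvInitSt
  rcases Nat.mod_two_eq_zero_or_one b.length with he | he
  · rw [if_pos (by simpa using he)]; simp
  · rw [if_neg (by simp [he])]
    have hh := pvGetD_cons_drop (b.drop (b.length / 2)) hbne
    calc b.take (b.length / 2) ++ [(b.drop (b.length / 2)).getD 0 'R'] ++
          (b.drop (b.length / 2)).drop 1
        = b.take (b.length / 2) ++
            ((b.drop (b.length / 2)).getD 0 'R' :: (b.drop (b.length / 2)).drop 1) := by simp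
      _ = b.take (b.length / 2) ++ b.drop (b.length / 2) := by rw [hh]
      _ = b := by simp

-- the two loops agree everywhere
theorem pvLoop_eq (n : Nat) : ∀ (b : List Char) (si : Nat), b.length ≤ n →
    pvALoop b si = pvBLoop b si := by
  induction n with
  | zero =>
    intro b si h
    have hb : b = [] := List.eq_nil_of_length_eq_zero (by omega)
    subst hb; rw [pvALoop, pvBLoop]; simp
  | succ n ih =>
    intro b si h
    by_cases hgt : 1 < b.length
    · rw [pvALoop, dif_pos hgt,
        ih _ _ (by have := pvABatch_len b si hgt; omega)]
      have hs := pvSim (b.take (b.length / 2)) (b.drop (b.length / 2)) (pvInitSt b si)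
        (pvInit_inv b si hgt)
      rw [pvInit_recon b si hgt] at hs
      have hsi : (pvInitSt b si).si = si := by unfold pvInitSt; split <;> rfl
      rw [hsi] at hs
      simp only [pvABatch]
      exact hs.symm
    · rw [pvALoop, dif_neg hgt, pvBLoop, dif_neg hgt]

-- ===== VERDICT (by name: the statement is the Claim_ definition above) =====
theorem get_arrows_to_pop_balloons_spec : Claim_equal_get_arrows_to_pop_balloons := by
  intro balloons _
  unfold Spec_get_arrows_to_pop_balloons get_arrows_to_pop_balloons get_arrows_to_pop_balloons_alt
  rw [pvLoop_eq balloons.toList.length balloons.toList 0 le_rfl]
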